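-- pv_equiv track=rewrite | github.com/zuspec/zuspec-dataclasses | src/zuspec/dataclasses/solver/propagators/arithmetic.py | _values_to_intervals
-- ===== SOURCE A (Python) =====
-- from typing import Dict, Set, Tuple, List
--
-- def _values_to_intervals(values: Set[int]) -> List[Tuple[int, int]]:
--     """Convert a set of values to a list of intervals"""
--     if not values:
--         return []
--
--     sorted_vals = sorted(values)
--     intervals = []
--     start = sorted_vals[0]
--     end = start
--
--     for val in sorted_vals[1:]:
--         if val == end + 1:
--             end = val
--         else:
--             intervals.append((start, end))
--             start = val
--             end = val
--     intervals.append((start, end))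
--     return intervals
-- ===== SOURCE B (Python) =====
-- def _values_to_intervals(values):
--     """Convert a set of values to a list of intervals"""
--     starts = sorted(v for v in values if v - 1 not in values)
--     ends = sorted(v for v in values if v + 1 not in values)
--     return list(zip(starts, ends))
-- ===== Notes on version B (the rewrite author's own statement) =====
-- stated objective: alternative
-- what changed: Replaces the sort-then-merge state-machine scan (start/end/append loop) by a boundary characterization: interval starts are the values with no predecessor in the set, ends are those with no successor; the result is the zip of the two sorted boundary lists.
import Mathlib
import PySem

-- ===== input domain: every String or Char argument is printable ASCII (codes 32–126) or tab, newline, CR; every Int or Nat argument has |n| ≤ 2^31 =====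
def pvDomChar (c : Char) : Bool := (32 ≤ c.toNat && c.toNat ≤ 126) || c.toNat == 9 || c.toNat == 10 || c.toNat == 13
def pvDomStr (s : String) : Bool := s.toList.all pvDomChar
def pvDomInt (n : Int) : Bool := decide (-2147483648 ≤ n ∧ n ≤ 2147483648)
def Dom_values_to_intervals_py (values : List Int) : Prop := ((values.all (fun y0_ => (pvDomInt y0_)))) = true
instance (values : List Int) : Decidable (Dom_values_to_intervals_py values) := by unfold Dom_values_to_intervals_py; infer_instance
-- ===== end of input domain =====

-- B replaces A's sort-then-merge scan by a boundary characterization: zip of the sorted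
-- values without predecessor (starts) with the sorted values without successor (ends).


-- ===== PORT A =====
-- the 'for val in sorted_vals[1:]' loop with state (intervals, start, end)
def vtiLoop (intervals : List (Int × Int)) (start end_ : Int) : List Int → List (Int × Int)
  | [] => intervals ++ [(start, end_)]
  | v :: rest =>
      if v = end_ + 1 then vtiLoop intervals start v rest
      else vtiLoop (intervals ++ [(start, end_)]) v v rest

def values_to_intervals_py (values : List Int) : List (Int × Int) :=
  if values = [] then []
  else
    match PySem.List.sorted values (fun x => x) false with
    | [] => []   -- unreachable: sorted of a nonempty list is nonempty
    | s0 :: rest => vtiLoop [] s0 s0 rest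

-- ===== PORT B =====
def values_to_intervals_py_alt (values : List Int) : List (Int × Int) :=
  let starts := PySem.List.sorted (values.filter (fun v => decide ((v - 1) ∉ values))) (fun x => x) false
  let ends := PySem.List.sorted (values.filter (fun v => decide ((v + 1) ∉ values))) (fun x => x) false
  starts.zip ends

-- ===== PRECONDITION & SPEC =====
-- Pre_ states the natural domain: the Python parameter is a set, so its elements are distinct.
def Pre_values_to_intervals_py (values : List Int) : Prop := values.Nodup
instance (values : List Int) : Decidable (Pre_values_to_intervals_py values) := by unfold Pre_values_to_intervals_py; infer_instance
def pvWitness_values_to_intervals_py : List Int := [3, 1, 2, 7, 5]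

def Spec_values_to_intervals_py (values : List Int) (out : List (Int × Int)) : Prop := out = values_to_intervals_py_alt values
instance (values : List Int) (out : List (Int × Int)) : Decidable (Spec_values_to_intervals_py values out) := by unfold Spec_values_to_intervals_py; infer_instance

-- ===== CLAIM (what is proved, stated in full; the proofs are below) =====
def Claim_equal_values_to_intervals_py : Prop := ∀ (values : List Int), Dom_values_to_intervals_py values → Pre_values_to_intervals_py values → Spec_values_to_intervals_py values (values_to_intervals_py values)

-- ===== LEMMAS AND PROOFS =====

-- Invariant of A's merge loop, with membership tested in the full value list T.
theorem vtiLoop_eq (T : List Int) :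
    ∀ (s : List Int) (acc : List (Int × Int)) (st e : Int),
      s.Pairwise (· < ·) → (∀ x ∈ s, e < x) →
      (∀ w ∈ s, w ∈ T) → e ∈ T →
      (∀ w ∈ s, ((w - 1) ∈ T ↔ w - 1 = e ∨ (w - 1) ∈ s)) →
      (∀ w ∈ s, ((w + 1) ∈ T ↔ (w + 1) ∈ s)) →
      ((e + 1) ∈ T ↔ (e + 1) ∈ s) →
      vtiLoop acc st e s =
        acc ++ (st :: s.filter (fun v => decide ((v - 1) ∉ T))).zip
               ((e :: s).filter (fun v => decide ((v + 1) ∉ T))) := by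
  intro s
  induction s with
  | nil =>
      intro acc st e _ _ _ _ _ _ hnext
      have h : (e + 1) ∉ T := fun hh => by simpa using hnext.mp hh
      simp [vtiLoop, h]
  | cons v rest ih =>
      intro acc st e hsort habove hsub heT hpred hsucc hnext
      have hvgt : e < v := habove v (by simp)
      have hvT : v ∈ T := hsub v (by simp)
      have hrest_sorted : rest.Pairwise (· < ·) := hsort.of_cons
      have hvlt : ∀ x ∈ rest, v < x := fun x hx => (List.pairwise_cons.mp hsort).1 x hx
      have hsub' : ∀ w ∈ rest, w ∈ T := fun w hw => hsub w (by simp [hw])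
      have hpred' : ∀ w ∈ rest, ((w - 1) ∈ T ↔ w - 1 = v ∨ (w - 1) ∈ rest) := by
        intro w hw
        have hwv : v < w := hvlt w hw
        have := hpred w (by simp [hw])
        constructor
        · intro h
          rcases this.mp h with h1 | h2
          · omega
          · rcases List.mem_cons.mp h2 with h3 | h4
            · exact Or.inl h3
            · exact Or.inr h4
        · intro h
          exact this.mpr (Or.inr (by rcases h with h | h <;> simp [h]))
      have hsucc' : ∀ w ∈ rest, ((w + 1) ∈ T ↔ (w + 1) ∈ rest) := by
        intro w hw
        have hwv : v < w := hvlt w hw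
        have := hsucc w (by simp [hw])
        constructor
        · intro h
          rcases List.mem_cons.mp (this.mp h) with h1 | h2
          · omega
          · exact h2
        · intro h; exact this.mpr (by simp [h])
      have hnext' : ((v + 1) ∈ T ↔ (v + 1) ∈ rest) := by
        have := hsucc v (by simp)
        constructor
        · intro h
          rcases List.mem_cons.mp (this.mp h) with h1 | h2
          · omega
          · exact h2
        · intro h; exact this.mpr (by simp [h])
      by_cases hc : v = e + 1
      · -- interval continues
        have hdropS : decide ((v - 1) ∉ T) = false := by
          simp only [decide_eq_false_iff_not, not_not]
          exact (hpred v (by simp)).mpr (Or.inl (by omega))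
        have hdropE : decide ((e + 1) ∉ T) = false := by
          simp only [decide_eq_false_iff_not, not_not]
          exact hnext.mpr (by simp [← hc])
        have := ih acc st v hrest_sorted hvlt hsub' hvT hpred' hsucc' hnext'
        simp only [vtiLoop, if_pos hc, this, List.filter_cons, hdropS, hdropE]
        simp
      · -- new interval begins at v
        have hkeepS : decide ((v - 1) ∉ T) = true := by
          simp only [decide_eq_true_eq]
          intro h
          rcases (hpred v (by simp)).mp h with h1 | h2
          · omega
          · rcases List.mem_cons.mp h2 with h3 | h4
            · omega
            · have := hvlt _ h4; omega
        have hkeepE : decide ((e + 1) ∉ T) = true := by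
          simp only [decide_eq_true_eq]
          intro h
          rcases List.mem_cons.mp (hnext.mp h) with h1 | h2
          · omega
          · have := hvlt _ h2; omega
        have := ih (acc ++ [(st, e)]) v v hrest_sorted hvlt hsub' hvT hpred' hsucc' hnext'
        simp only [vtiLoop, if_neg hc, this, List.filter_cons, hkeepS, hkeepE]
        simp [List.append_assoc]

-- ===== VERDICT =====
theorem values_to_intervals_py_spec : Claim_equal_values_to_intervals_py := by
  intro values _ hnodup
  unfold Spec_values_to_intervals_py values_to_intervals_py values_to_intervals_py_alt
  by_cases hnil : values = []
  · subst hnil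
    simp [PySem.List.sorted_eq_nil_iff]
  · simp only [if_neg hnil]
    set s := PySem.List.sorted values (fun x => x) false with hs
    have hperm : s.Perm values := PySem.List.sorted_perm values (fun x => x) false
    have hmem : ∀ x, x ∈ s ↔ x ∈ values := fun x => hperm.mem_iff
    have hsnodup : s.Nodup := hperm.nodup_iff.mpr hnodup
    have hle : s.Pairwise (fun a b => a ≤ b) := by
      have := PySem.List.sorted_pairwise values (fun x => x)
      simpa [← hs] using this
    have hlt : s.Pairwise (· < ·) :=
      (hle.and hsnodup).imp (fun h => lt_of_le_of_ne h.1 h.2)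
    have hsne : s ≠ [] := by
      intro h
      rw [hs] at h
      exact hnil ((PySem.List.sorted_eq_nil_iff values (fun x => x) false).mp h)
    obtain ⟨h0, t, hst⟩ := List.exists_cons_of_ne_nil hsne
    have hmin : ∀ y ∈ values, h0 ≤ y :=
      PySem.List.key_head_sorted_le values (fun x => x)
        (show PySem.List.sorted values (fun x => x) = h0 :: t by rw [← hs, hst])
    have htlt : ∀ x ∈ t, h0 < x := by
      intro x hx
      have := List.pairwise_cons.mp (hst ▸ hlt)
      exact this.1 x hx
    -- A's loop via the invariant, with T = values
    have hA : vtiLoop [] h0 h0 t =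
        (h0 :: t.filter (fun v => decide ((v - 1) ∉ values))).zip
          ((h0 :: t).filter (fun v => decide ((v + 1) ∉ values))) := by
      have := vtiLoop_eq values t [] h0 h0
        ((hst ▸ hlt).of_cons) htlt
        (fun w hw => (hmem w).mp (hst ▸ List.mem_cons_of_mem h0 hw))
        ((hmem h0).mp (hst ▸ List.mem_cons_self))
        (fun w hw => by
          rw [← hmem (w - 1), hst, List.mem_cons])
        (fun w hw => by
          rw [← hmem (w + 1), hst, List.mem_cons]
          have := htlt w hw
          constructor
          · rintro (h | h); · omega
            · exact h
          · intro h; exact Or.inr h)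
        (by
          rw [← hmem (h0 + 1), hst, List.mem_cons]
          constructor
          · rintro (h | h); · omega
            · exact h
          · intro h; exact Or.inr h)
      simpa using this
    -- B's sorted boundary lists are the filters of s
    have hBs : PySem.List.sorted (values.filter (fun v => decide ((v - 1) ∉ values))) (fun x => x) false
        = s.filter (fun v => decide ((v - 1) ∉ values)) :=
      PySem.List.sorted_eq_of_perm_of_pairwise_lt _ _ _ (hperm.filter _) (hlt.filter _)
    have hBe : PySem.List.sorted (values.filter (fun v => decide ((v + 1) ∉ values))) (fun x => x) false
        = s.filter (fun v => decide ((v + 1) ∉ values)) :=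
      PySem.List.sorted_eq_of_perm_of_pairwise_lt _ _ _ (hperm.filter _) (hlt.filter _)
    have hh0 : (h0 - 1) ∉ values := by
      intro h; have := hmin _ h; omega
    rw [hst]
    show vtiLoop [] h0 h0 t = _
    rw [hA, hBs, hBe, hst]
    simp [List.filter_cons, hh0]
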